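-- pv_equiv track=rewrite | github.com/ashishpundir924/rick-matrix- | grid_map.py | path_to_coords
-- ===== SOURCE A (Python) =====
-- def path_to_coords(path):
--     x, y = 0, 0
--     coords = [(x, y)]
--     for move in path:
--         if move == 'R':
--             x += 1
--         else:
--             y += 1
--         coords.append((x, y))
--     return coords
-- ===== SOURCE B (Python) =====
-- from itertools import accumulate
--
-- def path_to_coords(path):
--     xs = accumulate((1 if m == 'R' else 0 for m in path), initial=0)
--     ys = accumulate((0 if m == 'R' else 1 for m in path), initial=0)
--     return list(zip(xs, ys))
-- ===== Notes on version B (the rewrite author's own statement) =====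
-- stated objective: alternative
-- what changed: Replaces the single branching accumulator loop with two independent prefix-sum passes (itertools.accumulate over x- and y-indicators, initial=0) zipped into the coordinate list.
import Mathlib
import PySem

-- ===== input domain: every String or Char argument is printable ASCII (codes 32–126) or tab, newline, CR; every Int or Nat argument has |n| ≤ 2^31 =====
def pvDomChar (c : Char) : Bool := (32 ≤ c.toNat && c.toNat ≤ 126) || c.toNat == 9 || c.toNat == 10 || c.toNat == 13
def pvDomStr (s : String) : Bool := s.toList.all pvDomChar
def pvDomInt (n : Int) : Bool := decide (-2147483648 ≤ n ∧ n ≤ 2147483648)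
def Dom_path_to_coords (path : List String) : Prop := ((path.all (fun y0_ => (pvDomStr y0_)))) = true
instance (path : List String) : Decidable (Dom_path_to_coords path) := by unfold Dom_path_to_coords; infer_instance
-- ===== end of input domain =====

-- ===== PORT A =====
def pvStepA (st : Int × Int × List (Int × Int)) (move : String) : Int × Int × List (Int × Int) :=
  if move = "R" then (st.1 + 1, st.2.1, st.2.2 ++ [(st.1 + 1, st.2.1)])
  else (st.1, st.2.1 + 1, st.2.2 ++ [(st.1, st.2.1 + 1)])

def path_to_coords (path : List String) : List (Int × Int) :=
  (path.foldl pvStepA (0, 0, [((0 : Int), (0 : Int))])).2.2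

-- ===== PORT B =====
-- B: two prefix-sum passes over move indicators (accumulate with initial=0), zipped
def path_to_coords_alt (path : List String) : List (Int × Int) :=
  let xs := (path.map (fun m => if m = "R" then (1 : Int) else 0)).scanl (· + ·) 0
  let ys := (path.map (fun m => if m = "R" then (0 : Int) else 1)).scanl (· + ·) 0
  xs.zip ys

-- ===== PRECONDITION & SPEC =====
def Spec_path_to_coords (path : List String) (out : List (Int × Int)) : Prop := out = path_to_coords_alt path
instance (path : List String) (out : List (Int × Int)) : Decidable (Spec_path_to_coords path out) := by unfold Spec_path_to_coords; infer_instance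

-- ===== CLAIM (what is proved, stated in full; the proofs are below) =====
def Claim_equal_path_to_coords : Prop := ∀ (path : List String), Dom_path_to_coords path → Spec_path_to_coords path (path_to_coords path)

-- ===== LEMMAS AND PROOFS =====

-- ===== VERDICT (by name: the statement is the Claim_ definition above) =====
lemma pvZip_scanl {α β γ δ : Type} (f : β → α → β) (g : γ → δ → γ) (b : β) (c : γ)
    (l : List α) (l' : List δ) :
    (List.scanl f b l).zip (List.scanl g c l') =
      (b, c) :: (List.scanl f b l).tail.zip (List.scanl g c l').tail := by
  cases l <;> cases l' <;> simp

lemma pvFoldA_coords : ∀ (l : List String) (x y : Int) (c : List (Int × Int)),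
    (l.foldl pvStepA (x, y, c)).2.2 =
      c ++ (((l.map (fun m => if m = "R" then (1 : Int) else 0)).scanl (· + ·) x).tail.zip
            ((l.map (fun m => if m = "R" then (0 : Int) else 1)).scanl (· + ·) y).tail) := by
  intro l
  induction l with
  | nil => intro x y c; simp [List.scanl]
  | cons m l ih =>
    intro x y c
    by_cases hm : m = "R" <;>
      · simp only [pvStepA, hm, List.foldl_cons, List.map_cons, List.scanl_cons, ih,
          if_true, if_false, List.tail_cons, List.append_assoc]
        simp only [List.singleton_append, add_zero]
        rw [pvZip_scanl]

theorem path_to_coords_spec : Claim_equal_path_to_coords := by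
  intro path _
  unfold Spec_path_to_coords path_to_coords path_to_coords_alt
  rw [pvFoldA_coords, pvZip_scanl]
  simp
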